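-- pv_equiv track=rewrite | github.com/TGH-2020/FeVeT | code/error_analysis.py | decode_featvecs
-- ===== SOURCE A (Python) =====
-- def decode_featvecs(featvecs):
--     batch_size = len(featvecs)
--     decoded = []
--     for i in range(batch_size):
--         word = []
--         for vec in featvecs[i]:
--             if vec[0] == 3:
--                 break
--             word.append(vec)
--         decoded.append(word)
--
--     return decoded
-- ===== SOURCE B (Python) =====
-- def decode_featvecs(featvecs):
--     return [seq[:next((j for j, v in enumerate(seq) if v[0] == 3), len(seq))]
--             for seq in featvecs]
-- ===== Notes on version B (the rewrite author's own statement) =====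
-- stated objective: simpler
-- what changed: Replaces the index loop with append/break accumulation by a single comprehension that locates each sentinel's index and slices the prefix.
import Mathlib
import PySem

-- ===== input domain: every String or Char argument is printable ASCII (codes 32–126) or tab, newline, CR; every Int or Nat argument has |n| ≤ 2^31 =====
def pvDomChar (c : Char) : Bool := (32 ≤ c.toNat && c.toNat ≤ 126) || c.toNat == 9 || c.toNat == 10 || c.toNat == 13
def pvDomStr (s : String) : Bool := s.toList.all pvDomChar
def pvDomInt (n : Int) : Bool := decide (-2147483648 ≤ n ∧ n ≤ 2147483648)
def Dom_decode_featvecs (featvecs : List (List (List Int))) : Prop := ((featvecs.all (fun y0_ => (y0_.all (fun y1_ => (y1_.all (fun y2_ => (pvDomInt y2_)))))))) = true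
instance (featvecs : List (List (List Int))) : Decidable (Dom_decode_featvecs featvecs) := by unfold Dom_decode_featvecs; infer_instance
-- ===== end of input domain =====

-- B replaces A's append/break accumulation loop by locate-the-sentinel-then-slice per sub-sequence (objective: simpler).


-- ===== PORT A =====
-- inner loop: 'for vec in featvecs[i]: if vec[0] == 3: break; word.append(vec)'
-- vec[0] is PySem.List.pyGet? vec 0 (none = IndexError, excluded by Pre_)
def pvWordA : List (List Int) → List (List Int)
  | [] => []
  | vec :: rest =>
      if PySem.List.pyGet? vec 0 = some 3 then [] else vec :: pvWordA rest

def decode_featvecs (featvecs : (List (List (List Int)))) : List (List (List Int)) :=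
  featvecs.foldl (fun decoded seq => decoded ++ [pvWordA seq]) []

-- ===== PORT B =====
-- 'seq[:next((j for j, v in enumerate(seq) if v[0] == 3), len(seq))] for seq in featvecs'
def decode_featvecs_alt (featvecs : List (List (List Int))) : List (List (List Int)) :=
  featvecs.map (fun seq =>
    seq.take (match seq.findIdx? (fun v => PySem.List.pyGet? v 0 == some 3) with
              | some j => j
              | none => seq.length))

-- ===== PRECONDITION & SPEC =====
-- Pre_ excludes exactly the inputs on which A (and B) raise IndexError: a sub-sequence
-- containing an empty vector before (or in place of) the first sentinel vector.
def Pre_decode_featvecs (featvecs : List (List (List Int))) : Prop :=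
  (featvecs.all (fun seq =>
    (seq.takeWhile (fun v => !(PySem.List.pyGet? v 0 == some 3))).all (fun v => !v.isEmpty))) = true
instance (featvecs : List (List (List Int))) : Decidable (Pre_decode_featvecs featvecs) := by
  unfold Pre_decode_featvecs; infer_instance

def pvWitness_decode_featvecs : List (List (List Int)) := [[[1, 2], [3, 0], [7]], [[4]]]

def Spec_decode_featvecs (featvecs : List (List (List Int))) (out : List (List (List Int))) : Prop := out = decode_featvecs_alt featvecs
instance (featvecs : List (List (List Int))) (out : List (List (List Int))) : Decidable (Spec_decode_featvecs featvecs out) := by unfold Spec_decode_featvecs; infer_instance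

-- ===== CLAIM (what is proved, stated in full; the proofs are below) =====
def Claim_equal_decode_featvecs : Prop := ∀ (featvecs : List (List (List Int))), Dom_decode_featvecs featvecs → Pre_decode_featvecs featvecs → Spec_decode_featvecs featvecs (decode_featvecs featvecs)

-- ===== LEMMAS AND PROOFS =====

-- A's break-loop on one sub-sequence equals B's locate-then-slice on it (holds for every seq).
theorem pvWordA_eq_take (seq : List (List Int)) :
    pvWordA seq =
      seq.take (match seq.findIdx? (fun v => PySem.List.pyGet? v 0 == some 3) with
                | some j => j
                | none => seq.length) := by
  induction seq with
  | nil => rfl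
  | cons v rest ih =>
      by_cases h : PySem.List.pyGet? v 0 = some 3
      · simp [pvWordA, h, List.findIdx?_cons]
      · have hb : (PySem.List.pyGet? v 0 == some 3) = false := by
          simp [h]
        simp only [pvWordA, if_neg h, List.findIdx?_cons, hb, ih, List.length_cons]
        cases hf : (rest.findIdx? (fun v => PySem.List.pyGet? v 0 == some 3)) with
        | none => simp [List.take_succ_cons]
        | some j => simp [List.take_succ_cons]

-- ===== VERDICT (by name: the statement is the Claim_ definition above) =====
theorem decode_featvecs_spec : Claim_equal_decode_featvecs := by
  intro featvecs _ _
  unfold Spec_decode_featvecs decode_featvecs decode_featvecs_alt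
  rw [PySem.List.foldl_append_singleton_eq_map]
  exact List.map_congr_left (fun seq _ => pvWordA_eq_take seq)
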